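-- pv_equiv track=rewrite | github.com/FernandoIturbide/ProgramacionWeb2 | codigo.py | posfija2codigo
-- ===== SOURCE A (Python) =====
-- def posfija2codigo(posfija):
--     intermedio = []
--     codigo = []
--     pila = []
--     cont = 1
--
--     for e in posfija:
--         if e in '+-*/':  # Es operador
--             op2 = pila.pop()
--             op1 = pila.pop()
--             destino = f't{cont}'
--             cad = f'{destino} = {op1} {e} {op2}'
--             intermedio.append(cad)
--
--             if e == '+':
--                 cad2 = f'ADD {destino}, {op1}, {op2}'
--             elif e == '-':
--                 cad2 = f'SUB {destino}, {op1}, {op2}'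
--             elif e == '*':
--                 cad2 = f'MUL {destino}, {op1}, {op2}'
--             elif e == '/':
--                 cad2 = f'DIV {destino}, {op1}, {op2}'
--
--             codigo.append(cad2)
--             pila.append(destino)
--             cont += 1
--         else:  # Es un operando
--             pila.append(e)
--
--     return intermedio, codigo
-- ===== SOURCE B (Python) =====
-- def posfija2codigo(posfija):
--     # Two-phase version: build an expression tree (forest) with a node stack,
--     # then emit both code lists in one recursive post-order walk.
--     pila = []
--     for e in posfija:
--         if e in '+-*/':  # Es operador (same substring test as the original)
--             der = pila.pop()
--             izq = pila.pop()
--             pila.append((e, izq, der))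
--         else:  # Es un operando
--             pila.append(e)
--
--     intermedio = []
--     codigo = []
--
--     def emitir(nodo, cont):
--         if isinstance(nodo, tuple):
--             e, izq, der = nodo
--             cont, op1 = emitir(izq, cont)
--             cont, op2 = emitir(der, cont)
--             destino = f't{cont}'
--             intermedio.append(f'{destino} = {op1} {e} {op2}')
--             if e == '+':
--                 cad2 = f'ADD {destino}, {op1}, {op2}'
--             elif e == '-':
--                 cad2 = f'SUB {destino}, {op1}, {op2}'
--             elif e == '*':
--                 cad2 = f'MUL {destino}, {op1}, {op2}'
--             elif e == '/':
--                 cad2 = f'DIV {destino}, {op1}, {op2}'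
--             codigo.append(cad2)
--             return cont + 1, destino
--         return cont, nodo
--
--     cont = 1
--     for nodo in pila:
--         cont, _ = emitir(nodo, cont)
--
--     return intermedio, codigo
-- ===== Notes on version B (the rewrite author's own statement) =====
-- stated objective: alternative
-- what changed: B replaces A's single-pass string-stack emitter by a two-phase design (build an expression forest with a stack of tree nodes, then emit both output lists in one recursive post-order walk threading the temp counter); Pre_ excludes inputs where a pop underflows (A raises IndexError) and inputs containing a token that passes the substring operator test '+-*/' without being a single operator ('', '+-', '-*', ...), where A raises NameError or reuses a stale cad2 from an earlier operator while B's per-node emitter raises UnboundLocalError there.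
import Mathlib
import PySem

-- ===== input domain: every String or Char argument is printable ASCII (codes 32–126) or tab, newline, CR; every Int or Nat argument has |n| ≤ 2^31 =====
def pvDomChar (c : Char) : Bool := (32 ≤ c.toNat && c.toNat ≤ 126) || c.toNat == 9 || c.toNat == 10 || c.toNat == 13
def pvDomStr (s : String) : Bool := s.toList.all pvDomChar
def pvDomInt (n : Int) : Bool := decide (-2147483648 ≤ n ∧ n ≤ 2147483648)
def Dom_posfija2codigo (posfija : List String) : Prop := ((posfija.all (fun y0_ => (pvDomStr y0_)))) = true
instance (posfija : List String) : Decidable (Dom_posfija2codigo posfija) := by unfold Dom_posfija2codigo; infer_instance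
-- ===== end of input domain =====

-- B rebuilds the same outputs by first stacking an expression forest and then emitting it
-- in one post-order walk (objective: alternative decomposition, same cost).


-- ===== PORT A =====
-- the `e in '+-*/'` substring test, identical in both Pythons
def isOpTok (e : String) : Bool := PySem.Str.isIn e "+-*/"

structure AState where
  intermedio : List String
  codigo : List String
  pila : List String   -- head = top of the Python list (its end)
  cont : Int
  cad2 : String        -- last computed cad2 (Python: leftover local; "" before first assignment)
deriving Repr

def stepA (st : AState) (e : String) : AState :=
  if isOpTok e then
    match st.pila with
    | op2 :: op1 :: rest =>
      let destino := "t" ++ PySem.Int.toStr st.cont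
      let cad := destino ++ " = " ++ op1 ++ " " ++ e ++ " " ++ op2
      let cad2 :=
        if e = "+" then "ADD " ++ destino ++ ", " ++ op1 ++ ", " ++ op2
        else if e = "-" then "SUB " ++ destino ++ ", " ++ op1 ++ ", " ++ op2
        else if e = "*" then "MUL " ++ destino ++ ", " ++ op1 ++ ", " ++ op2
        else if e = "/" then "DIV " ++ destino ++ ", " ++ op1 ++ ", " ++ op2
        else st.cad2   -- Python: cad2 keeps its previous value (or raises NameError); outside Pre_
      ⟨st.intermedio ++ [cad], st.codigo ++ [cad2], destino :: rest, st.cont + 1, cad2⟩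
    | _ => st          -- Python raises IndexError here; outside Pre_
  else
    ⟨st.intermedio, st.codigo, e :: st.pila, st.cont, st.cad2⟩

def posfija2codigo (posfija : List String) : List String × List String :=
  let st := posfija.foldl stepA ⟨[], [], [], 1, ""⟩
  (st.intermedio, st.codigo)

-- ===== PORT B =====
inductive ETree where
  | leaf : String → ETree
  | node : String → ETree → ETree → ETree
deriving Repr

def buildStep (pila : List ETree) (e : String) : List ETree :=
  if isOpTok e then
    match pila with
    | der :: izq :: rest => ETree.node e izq der :: rest
    | _ => pila          -- Python raises IndexError here; outside Pre_
  else
    ETree.leaf e :: pila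

-- post-order emitter of Source B: returns ((intermedio, codigo), cont, name of this node)
def emitir : ETree → Int → List String × List String → (List String × List String) × Int × String
  | ETree.leaf s, cont, acc => (acc, cont, s)
  | ETree.node e izq der, cont, acc =>
    let r1 := emitir izq cont acc
    let r2 := emitir der r1.2.1 r1.1
    let destino := "t" ++ PySem.Int.toStr r2.2.1
    let op1 := r1.2.2
    let op2 := r2.2.2
    let cad := destino ++ " = " ++ op1 ++ " " ++ e ++ " " ++ op2
    let cad2 :=
      if e = "+" then "ADD " ++ destino ++ ", " ++ op1 ++ ", " ++ op2
      else if e = "-" then "SUB " ++ destino ++ ", " ++ op1 ++ ", " ++ op2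
      else if e = "*" then "MUL " ++ destino ++ ", " ++ op1 ++ ", " ++ op2
      else if e = "/" then "DIV " ++ destino ++ ", " ++ op1 ++ ", " ++ op2
      else ""            -- Python raises UnboundLocalError here; outside Pre_
    ((r2.1.1 ++ [cad], r2.1.2 ++ [cad2]), r2.2.1 + 1, destino)

def posfija2codigo_alt (posfija : List String) : List String × List String :=
  let pila := posfija.foldl buildStep []
  -- Source B iterates the stack bottom-to-top (Python insertion order = our list reversed)
  let res := pila.reverse.foldl
    (fun (p : (List String × List String) × Int) t =>
      let r := emitir t p.2 p.1
      (r.1, r.2.1))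
    (([], []), 1)
  res.1

-- ===== PRECONDITION & SPEC =====
-- Pre_ excludes inputs where a pop underflows (A raises IndexError) and inputs containing a
-- token that passes the substring test '+-*/' without being a single operator ('', '+-', …),
-- where A raises NameError or returns a line with a stale cad2 while B raises UnboundLocalError.
def Pre_posfija2codigo (posfija : List String) : Prop :=
  (∀ e ∈ posfija, isOpTok e = true → e = "+" ∨ e = "-" ∨ e = "*" ∨ e = "/") ∧
  (∀ i ∈ List.range posfija.length, isOpTok (posfija.getD i "") = true →
     (posfija.take i).countP (fun e => isOpTok e) + 2 ≤
       (posfija.take i).countP (fun e => !isOpTok e))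
instance (posfija : List String) : Decidable (Pre_posfija2codigo posfija) := by
  unfold Pre_posfija2codigo; infer_instance

def pvWitness_posfija2codigo : List String := ["a", "b", "+", "c", "*"]

def Spec_posfija2codigo (posfija : List String) (out : List String × List String) : Prop := out = posfija2codigo_alt posfija
instance (posfija : List String) (out : List String × List String) : Decidable (Spec_posfija2codigo posfija out) := by unfold Spec_posfija2codigo; infer_instance

-- ===== CLAIM (what is proved, stated in full; the proofs are below) =====
def Claim_equal_posfija2codigo : Prop := ∀ (posfija : List String), Dom_posfija2codigo posfija → Pre_posfija2codigo posfija → Spec_posfija2codigo posfija (posfija2codigo posfija)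

-- ===== LEMMAS AND PROOFS =====

-- emitter over a whole forest (left to right), also collecting the node names in order
def emitF : List ETree → (List String × List String) × Int → List String →
    ((List String × List String) × Int) × List String
  | [], p, ns => (p, ns)
  | t :: ts, p, ns =>
    let r := emitir t p.2 p.1
    emitF ts (r.1, r.2.1) (ns ++ [r.2.2])

theorem emitF_append (xs ys : List ETree) (p : (List String × List String) × Int)
    (ns : List String) :
    emitF (xs ++ ys) p ns = emitF ys (emitF xs p ns).1 (emitF xs p ns).2 := by
  induction xs generalizing p ns with
  | nil => simp [emitF]
  | cons t ts ih => simp [emitF, ih]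

-- Source B's final loop computes exactly emitF's first component
theorem altFold_eq_emitF (ts : List ETree) (p : (List String × List String) × Int)
    (ns : List String) :
    ts.foldl (fun (p : (List String × List String) × Int) t =>
        let r := emitir t p.2 p.1
        (r.1, r.2.1)) p = (emitF ts p ns).1 := by
  induction ts generalizing p ns with
  | nil => simp [emitF]
  | cons t ts ih => simp [emitF]; exact ih _ _

-- the invariant relating A's running state to B's tree stack
def PVInv (pre : List String) (st : AState) (S : List ETree) : Prop :=
  st.intermedio = (emitF S.reverse (([], []), 1) []).1.1.1 ∧
  st.codigo = (emitF S.reverse (([], []), 1) []).1.1.2 ∧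
  st.cont = (emitF S.reverse (([], []), 1) []).1.2 ∧
  st.pila = (emitF S.reverse (([], []), 1) []).2.reverse ∧
  S.length + pre.countP (fun e => isOpTok e) = pre.countP (fun e => !isOpTok e)

theorem inv_step (pre suf : List String) (e : String) (st : AState) (S : List ETree)
    (hP : Pre_posfija2codigo (pre ++ e :: suf)) (h : PVInv pre st S) :
    PVInv (pre ++ [e]) (stepA st e) (buildStep S e) := by
  obtain ⟨hI, hC, hN, hPila, hLen⟩ := h
  by_cases hop : isOpTok e = true
  · -- operator token
    have he4 : e = "+" ∨ e = "-" ∨ e = "*" ∨ e = "/" := hP.1 e (by simp) hop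
    have hcnt : pre.countP (fun x => isOpTok x) + 2 ≤ pre.countP (fun x => !isOpTok x) := by
      have hg : (pre ++ e :: suf).getD pre.length "" = e := by simp
      have ht : (pre ++ e :: suf).take pre.length = pre := by simp
      have := hP.2 pre.length (by simp) (by rw [hg]; exact hop)
      rwa [ht] at this
    have hS2 : 2 ≤ S.length := by omega
    obtain ⟨der, izq, rest, rfl⟩ : ∃ d i r, S = d :: i :: r := by
      match S, hS2 with
      | d :: i :: r, _ => exact ⟨d, i, r, rfl⟩
    have hrev : (der :: izq :: rest).reverse = rest.reverse ++ ([izq] ++ [der]) := by simp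
    simp only [hrev] at hI hC hN hPila
    set E := emitF rest.reverse (([], []), 1) [] with hE
    set r1 := emitir izq E.1.2 E.1.1 with hr1
    set r2 := emitir der r1.2.1 r1.1 with hr2
    have hold2 : emitF (rest.reverse ++ ([izq] ++ [der])) (([], []), 1) [] =
        ((r2.1, r2.2.1), E.2 ++ [r1.2.2] ++ [r2.2.2]) := by
      rw [emitF_append, ← hE]; simp [emitF, hr1, hr2]
    simp only [hold2] at hI hC hN hPila
    have hpila : st.pila = r2.2.2 :: r1.2.2 :: E.2.reverse := by
      rw [hPila]; simp
    have hnew : (buildStep (der :: izq :: rest) e) = ETree.node e izq der :: rest := by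
      simp [buildStep, hop]
    have hnewrev : (ETree.node e izq der :: rest).reverse =
        rest.reverse ++ [ETree.node e izq der] := by simp
    have hnode : emitF (rest.reverse ++ [ETree.node e izq der]) (([], []), 1) [] =
        (((r2.1.1 ++ ["t" ++ PySem.Int.toStr r2.2.1 ++ " = " ++ r1.2.2 ++ " " ++ e ++ " " ++ r2.2.2],
           r2.1.2 ++ [if e = "+" then "ADD " ++ ("t" ++ PySem.Int.toStr r2.2.1) ++ ", " ++ r1.2.2 ++ ", " ++ r2.2.2
             else if e = "-" then "SUB " ++ ("t" ++ PySem.Int.toStr r2.2.1) ++ ", " ++ r1.2.2 ++ ", " ++ r2.2.2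
             else if e = "*" then "MUL " ++ ("t" ++ PySem.Int.toStr r2.2.1) ++ ", " ++ r1.2.2 ++ ", " ++ r2.2.2
             else if e = "/" then "DIV " ++ ("t" ++ PySem.Int.toStr r2.2.1) ++ ", " ++ r1.2.2 ++ ", " ++ r2.2.2
             else ""]),
          r2.2.1 + 1), E.2 ++ ["t" ++ PySem.Int.toStr r2.2.1]) := by
      rw [emitF_append, ← hE]
      simp only [emitF, emitir]
      rw [← hr1, ← hr2]
    refine ⟨?_, ?_, ?_, ?_, ?_⟩
    · rw [hnew, hnewrev, hnode]
      simp only [stepA, hop, if_pos, hpila]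
      simp [hI, hN]
    · rw [hnew, hnewrev, hnode]
      simp only [stepA, hop, if_pos, hpila]
      simp only [hC, hN]
      rcases he4 with rfl | rfl | rfl | rfl <;> simp
    · rw [hnew, hnewrev, hnode]
      simp only [stepA, hop, if_pos, hpila]
      simp [hN]
    · rw [hnew, hnewrev, hnode]
      simp only [stepA, hop, if_pos, hpila]
      simp [hN]
    · rw [hnew]
      simp only [List.countP_append, List.countP_cons, hop, List.length_cons,
        Bool.not_true] at *
      simp at *
      omega
  · -- operand token
    have hbs : buildStep S e = ETree.leaf e :: S := by simp [buildStep, hop]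
    have hsa : stepA st e = ⟨st.intermedio, st.codigo, e :: st.pila, st.cont, st.cad2⟩ := by
      simp [stepA, hop]
    have hrev : (ETree.leaf e :: S).reverse = S.reverse ++ [ETree.leaf e] := by simp
    have hnew : emitF (ETree.leaf e :: S).reverse (([], []), 1) [] =
        ((emitF S.reverse (([], []), 1) []).1,
          (emitF S.reverse (([], []), 1) []).2 ++ [e]) := by
      rw [hrev, emitF_append]; simp [emitF, emitir]
    refine ⟨?_, ?_, ?_, ?_, ?_⟩
    · rw [hbs, hnew, hsa]; exact hI
    · rw [hbs, hnew, hsa]; exact hC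
    · rw [hbs, hnew, hsa]; exact hN
    · rw [hbs, hnew, hsa]; simp [hPila]
    · rw [hbs]
      simp only [List.countP_append, List.countP_cons, hop, List.length_cons,
        Bool.not_false] at *
      simp at *
      omega

theorem inv_fold (suf : List String) : ∀ (pre : List String) (st : AState) (S : List ETree),
    Pre_posfija2codigo (pre ++ suf) → PVInv pre st S →
    PVInv (pre ++ suf) (suf.foldl stepA st) (suf.foldl buildStep S) := by
  induction suf with
  | nil => intro pre st S _ h; simpa using h
  | cons e suf ih =>
    intro pre st S hP h
    have h1 := inv_step pre suf e st S hP h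
    have := ih (pre ++ [e]) (stepA st e) (buildStep S e) (by simpa using hP) h1
    simpa using this

-- ===== VERDICT (by name: the statement is the Claim_ definition above) =====
theorem alt_eq_emitF (posfija : List String) :
    posfija2codigo_alt posfija =
      (emitF ((posfija.foldl buildStep []).reverse) (([], []), 1) []).1.1 := by
  show (List.foldl _ ((([], []) : List String × List String), (1 : Int))
      ((posfija.foldl buildStep []).reverse)).1 = _
  rw [altFold_eq_emitF _ _ []]

theorem posfija2codigo_spec : Claim_equal_posfija2codigo := by
  intro posfija _ hP
  have h0 : PVInv [] ⟨[], [], [], 1, ""⟩ [] := ⟨rfl, rfl, rfl, rfl, rfl⟩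
  have h := inv_fold posfija [] ⟨[], [], [], 1, ""⟩ [] (by simpa using hP) h0
  obtain ⟨hI, hC, -, -, -⟩ := h
  unfold Spec_posfija2codigo
  rw [alt_eq_emitF]
  exact Prod.ext hI hC
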